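-- pv_equiv track=rewrite | github.com/IES-Rafael-Alberti/dawb1-2425-ejercicios-u2-danielmi5 | src/ej23_02.py | obtener_impares
-- ===== SOURCE A (Python) =====
-- def es_impar(num):
--     if num % 2 != 0:
--         return True
--     else:
--         return False
--
-- def obtener_impares(num):
--     # cadena vacía para guardar los impares
--     cadena_impares = ""
--     # recorre desde 1 hasta el numero, si i es impar lo añade a la cadena.
--     for i in range(1, num + 1):
--         if es_impar(i):
--             # si es mayor o igual, i es el último número, por lo que detrás en vez de una coma añado un punto
--             if i >= num-1:
--                 cadena_impares += str(i) + "."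
--             else: #De lo contrario, añade el número con coma
--                 cadena_impares += str(i) +", "
--         else: #Si no lo es, no hace nada.
--             pass
--     #retorna la cadena
--     return cadena_impares
-- ===== SOURCE B (Python) =====
-- def obtener_impares(num):
--     odds = [str(i) for i in range(1, num + 1, 2)]
--     return ", ".join(odds) + "." if odds else ""
-- ===== Notes on version B (the rewrite author's own statement) =====
-- stated objective: simpler
-- what changed: B drops A's per-element odd test and last-element separator branch: it generates the odds directly with a step-2 range and handles separators once with ', '.join plus a single trailing period.
import Mathlib
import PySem

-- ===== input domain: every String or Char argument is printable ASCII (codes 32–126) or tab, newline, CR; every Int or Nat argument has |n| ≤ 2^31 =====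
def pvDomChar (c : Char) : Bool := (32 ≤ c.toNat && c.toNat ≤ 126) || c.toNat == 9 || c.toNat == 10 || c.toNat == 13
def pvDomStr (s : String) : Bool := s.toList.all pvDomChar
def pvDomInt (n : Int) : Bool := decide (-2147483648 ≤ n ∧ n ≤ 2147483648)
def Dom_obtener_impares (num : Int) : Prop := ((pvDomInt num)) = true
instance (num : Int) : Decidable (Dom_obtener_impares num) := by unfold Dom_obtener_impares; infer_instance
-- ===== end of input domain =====

-- B replaces A's per-element last-separator branch by a step-2 range joined with ", " and one trailing "." (objective: simpler).

-- ===== PORT A =====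
def es_impar (num : Int) : Bool :=
  if PySem.Int.mod num 2 ≠ 0 then true else false

def obtener_impares (num : Int) : String :=
  (PySem.List.pyRange 1 (num + 1) 1).foldl
    (fun cadena_impares i =>
      if es_impar i then
        if i ≥ num - 1 then cadena_impares ++ (PySem.Int.toStr i ++ ".")
        else cadena_impares ++ (PySem.Int.toStr i ++ ", ")
      else cadena_impares) ""

-- ===== PORT B =====
def obtener_impares_alt (num : Int) : String :=
  let odds := (PySem.List.pyRange 1 (num + 1) 2).map PySem.Int.toStr
  if !odds.isEmpty then PySem.Str.join ", " odds ++ "." else ""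

-- ===== PRECONDITION & SPEC =====
def Spec_obtener_impares (num : Int) (out : String) : Prop := out = obtener_impares_alt num
instance (num : Int) (out : String) : Decidable (Spec_obtener_impares num out) := by unfold Spec_obtener_impares; infer_instance

-- ===== CLAIM (what is proved, stated in full; the proofs are below) =====
def Claim_equal_obtener_impares : Prop := ∀ (num : Int), Dom_obtener_impares num → Spec_obtener_impares num (obtener_impares num)

-- ===== LEMMAS AND PROOFS =====

lemma es_impar_odd (a : Int) (h : a % 2 = 1) : es_impar a = true := by
  simp [es_impar, h]

lemma es_impar_even (a : Int) (h : a % 2 = 0) : es_impar a = false := by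
  simp [es_impar, h]

lemma pyRange_two_nil (a b : Int) (h : b ≤ a) : PySem.List.pyRange a b 2 = [] := by
  rw [PySem.List.pyRange_of_pos a b (by norm_num : (0:Int) < 2)]
  simp [show ¬ a < b by omega]

lemma pyRange_two_cons (a b : Int) (h : a < b) :
    PySem.List.pyRange a b 2 = a :: PySem.List.pyRange (a + 2) b 2 := by
  rw [PySem.List.pyRange_of_pos a b (by norm_num : (0:Int) < 2),
      PySem.List.pyRange_of_pos (a + 2) b (by norm_num : (0:Int) < 2)]
  by_cases h2 : a + 2 < b
  · have e1 : ((b - a + 2 - 1) / 2).toNat = ((b - (a + 2) + 2 - 1) / 2).toNat + 1 := by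
      omega
    simp only [if_pos h, if_pos h2, e1, List.range_succ_eq_map, List.map_cons, List.map_map]
    refine List.cons_eq_cons.mpr ⟨by push_cast; ring, ?_⟩
    · apply List.map_congr_left
      intro k _
      simp only [Function.comp_apply]
      push_cast
      ring
  · have e1 : ((b - a + 2 - 1) / 2).toNat = 1 := by omega
    simp [if_pos h, if_neg h2, e1, List.range_succ]

-- the ", " separator and the "." terminator as character lists
lemma key_fold (num : Int) : ∀ (n : Nat) (a : Int) (acc : String),
    a % 2 = 1 → a ≤ num → (num + 1 - a).toNat ≤ n →
    ((PySem.List.pyRange a (num + 1) 1).foldl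
      (fun cadena_impares i =>
        if es_impar i then
          if i ≥ num - 1 then cadena_impares ++ (PySem.Int.toStr i ++ ".")
          else cadena_impares ++ (PySem.Int.toStr i ++ ", ")
        else cadena_impares) acc).toList
    = acc.toList ++
        PySem.Chars.join (", ".toList)
          (((PySem.List.pyRange a (num + 1) 2).map PySem.Int.toStr).map String.toList)
        ++ ".".toList := by
  intro n
  induction n with
  | zero =>
    intro a acc _ ha hn
    omega
  | succ n ih =>
    intro a acc hodd ha hn
    rw [PySem.List.pyRange_one_cons (by omega : a < num + 1)]
    simp only [List.foldl_cons, es_impar_odd a hodd, if_true]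
    by_cases h2 : a + 2 ≤ num
    · -- a is not the last odd: separator ", ", and the next element a+1 is even
      rw [if_neg (by omega : ¬ a ≥ num - 1)]
      rw [PySem.List.pyRange_one_cons (by omega : a + 1 < num + 1)]
      simp only [List.foldl_cons, es_impar_even (a + 1) (by omega), Bool.false_eq_true,
        if_false]
      rw [show a + 1 + 1 = a + 2 by ring]
      rw [ih (a + 2) (acc ++ (PySem.Int.toStr a ++ ", ")) (by omega) (by omega) (by omega)]
      rw [pyRange_two_cons a (num + 1) (by omega)]
      have hne : PySem.List.pyRange (a + 2) (num + 1) 2 =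
          (a + 2) :: PySem.List.pyRange (a + 2 + 2) (num + 1) 2 :=
        pyRange_two_cons (a + 2) (num + 1) (by omega)
      rw [hne]
      simp only [List.map_cons, PySem.Chars.join_cons_cons, String.toList_append,
        PySem.Int.toList_toStr, List.append_assoc]
    · -- a is the last odd (a = num - 1 or a = num): terminator "."
      rw [if_pos (by omega : a ≥ num - 1)]
      have hsingle : PySem.List.pyRange a (num + 1) 2 = [a] := by
        rw [pyRange_two_cons a (num + 1) (by omega), pyRange_two_nil _ _ (by omega)]
      have htail : (PySem.List.pyRange (a + 1) (num + 1) 1).foldl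
          (fun cadena_impares i =>
            if es_impar i then
              if i ≥ num - 1 then cadena_impares ++ (PySem.Int.toStr i ++ ".")
              else cadena_impares ++ (PySem.Int.toStr i ++ ", ")
            else cadena_impares) (acc ++ (PySem.Int.toStr a ++ ".")) =
          acc ++ (PySem.Int.toStr a ++ ".") := by
        rcases (by omega : a = num ∨ a = num - 1) with h | h
        · rw [PySem.List.pyRange_one_eq_nil (by omega)]
          rfl
        · have : a + 1 + 1 = num + 1 := by omega
          rw [← this, PySem.List.pyRange_one_singleton]
          simp [es_impar_even (a + 1) (by omega)]
      rw [htail, hsingle]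
      simp [PySem.Chars.join_singleton, PySem.Int.toList_toStr]

-- ===== VERDICT (by name: the statement is the Claim_ definition above) =====
theorem obtener_impares_spec : Claim_equal_obtener_impares := by
  intro num _
  unfold Spec_obtener_impares obtener_impares obtener_impares_alt
  by_cases hpos : 1 ≤ num
  · have hcons : PySem.List.pyRange 1 (num + 1) 2 =
        1 :: PySem.List.pyRange 3 (num + 1) 2 := by
      have := pyRange_two_cons 1 (num + 1) (by omega)
      simpa using this
    apply String.toList_inj.mp
    rw [key_fold num (num + 1 - 1).toNat 1 "" (by norm_num) hpos (le_refl _)]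
    rw [hcons]
    simp only [List.map_cons, List.isEmpty_cons, Bool.not_false, if_true]
    simp only [String.toList_append, PySem.Str.toList_join]
    rw [← List.map_cons, ← List.map_cons, ← hcons]
    simp
  · rw [PySem.List.pyRange_one_eq_nil (by omega), pyRange_two_nil _ _ (by omega)]
    simp
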